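-- pv_equiv track=rewrite | github.com/KalpakTole/CompetitiveProgramming | Others/am_test_2.py | minimumKeypadClickCount
-- ===== SOURCE A (Python) =====
-- def minimumKeypadClickCount(S):
-- 	d = {}
-- 	for ele in S:
-- 		d[ele] = d.get(ele,0) + 1
-- 	d = {k:v for k,v in sorted(d.items(), key=lambda x:x[1], reverse=True)}
-- 	li = list(d.items())
-- 	ans = 0
-- 	for i in range(len(li)):
-- 		mul = i//9+1
-- 		ans += li[i][1] * mul
-- 	return ans
-- ===== SOURCE B (Python) =====
-- def minimumKeypadClickCount(S):
-- 	freq = {}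
-- 	for ch in S:
-- 		freq[ch] = freq.get(ch, 0) + 1
-- 	values = sorted(freq.values(), reverse=True)
--
-- 	def blocks(vals, g):
-- 		if not vals:
-- 			return 0
-- 		return (g + 1) * sum(vals[:9]) + blocks(vals[9:], g + 1)
--
-- 	return blocks(values, 0)
-- ===== Notes on version B (the rewrite author's own statement) =====
-- stated objective: alternative
-- what changed: B sorts the frequency values alone (dropping the characters) and accumulates them recursively in blocks of nine, weighting block g by g+1, instead of A's re-built sorted dict and per-index loop with weight i//9+1.
import Mathlib
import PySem

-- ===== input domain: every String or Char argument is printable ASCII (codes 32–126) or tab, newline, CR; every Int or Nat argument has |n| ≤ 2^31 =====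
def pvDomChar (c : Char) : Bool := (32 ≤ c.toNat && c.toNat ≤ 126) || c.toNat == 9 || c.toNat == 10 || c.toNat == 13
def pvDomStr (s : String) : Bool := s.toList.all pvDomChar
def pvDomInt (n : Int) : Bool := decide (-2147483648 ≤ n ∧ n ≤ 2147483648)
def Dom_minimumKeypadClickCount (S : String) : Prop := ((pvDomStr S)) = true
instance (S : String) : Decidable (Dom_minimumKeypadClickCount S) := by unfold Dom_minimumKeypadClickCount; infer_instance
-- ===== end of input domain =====

-- B replaces A's per-index ranked loop (weight i//9+1 over sorted (char,freq) items re-packed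
-- into a dict) by sorting the frequency VALUES alone and summing them in blocks of nine
-- (block g weighted g+1); objective: alternative decomposition, same cost.

-- ===== PORT A =====
def minimumKeypadClickCount (S : String) : Int :=
  -- d = {}; for ele in S: d[ele] = d.get(ele,0)+1
  let d := S.toList.foldl (fun d ele => d.insert ele (d.getD ele (0 : Int) + 1)) PySem.Dict.empty
  -- d = {k:v for k,v in sorted(d.items(), key=lambda x:x[1], reverse=True)}  (a dict built by inserting the sorted pairs in order)
  let d2 := (PySem.List.sorted d.items (fun x => x.2) true).foldl
      (fun d p => d.insert p.1 p.2) PySem.Dict.empty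
  let li := d2.items
  -- for i in range(len(li)): ans += li[i][1] * (i//9+1)
  (PySem.List.pyRange 0 (li.length : Int) 1).foldl
    (fun ans i => ans + (PySem.List.pyGetD li i ('a', 0)).2 * (PySem.Int.floordiv i 9 + 1)) 0

-- ===== PORT B =====
-- blocks(vals, g): vals[:9] / vals[9:] with nonnegative bounds are exactly take/drop
-- (PySem.List.slice_to_natCast / slice_from_natCast)
def pvBlocks (vals : List Int) (g : Int) : Int :=
  match vals with
  | [] => 0
  | v :: vs => (g + 1) * ((v :: vs).take 9).sum + pvBlocks ((v :: vs).drop 9) (g + 1)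
termination_by vals.length
decreasing_by simp

def minimumKeypadClickCount_alt (S : String) : Int :=
  let freq := S.toList.foldl (fun d ch => d.insert ch (d.getD ch (0 : Int) + 1)) PySem.Dict.empty
  let values := PySem.List.sorted freq.values (fun v => v) true
  pvBlocks values 0

-- ===== PRECONDITION & SPEC =====
def Spec_minimumKeypadClickCount (S : String) (out : Int) : Prop := out = minimumKeypadClickCount_alt S
instance (S : String) (out : Int) : Decidable (Spec_minimumKeypadClickCount S out) := by unfold Spec_minimumKeypadClickCount; infer_instance

-- ===== CLAIM (what is proved, stated in full; the proofs are below) =====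
def Claim_equal_minimumKeypadClickCount : Prop := ∀ (S : String), Dom_minimumKeypadClickCount S → Spec_minimumKeypadClickCount S (minimumKeypadClickCount S)

-- ===== LEMMAS AND PROOFS =====

-- the common weighted sum: element at global rank k contributes v * (k/9 + 1)
def pvWsum : List Int → Nat → Int
  | [], _ => 0
  | v :: vs, k => v * (((k / 9 : Nat) : Int) + 1) + pvWsum vs (k + 1)

theorem pvWsum_append (xs ys : List Int) (k : Nat) :
    pvWsum (xs ++ ys) k = pvWsum xs k + pvWsum ys (k + xs.length) := by
  induction xs generalizing k with
  | nil => simp [pvWsum]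
  | cons v vs ih => simp [pvWsum, ih, Nat.add_right_comm, Nat.add_assoc]; ring

theorem pvWsum_chunk (c : List Int) (g k : Nat) (h : c.length + k ≤ 9) :
    pvWsum c (9 * g + k) = ((g : Int) + 1) * c.sum := by
  induction c generalizing k with
  | nil => simp [pvWsum]
  | cons v vs ih =>
    have hk : (9 * g + k) / 9 = g := by
      have : k < 9 := by simp only [List.length_cons] at h; omega
      omega
    have hrec := ih (k + 1) (by simp only [List.length_cons] at h; omega)
    rw [pvWsum, hk, show 9 * g + k + 1 = 9 * g + (k + 1) from by omega, hrec, List.sum_cons]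
    ring

theorem pvWsum_chunk0 (c : List Int) (g : Nat) (h : c.length ≤ 9) :
    pvWsum c (9 * g) = ((g : Int) + 1) * c.sum := by
  simpa using pvWsum_chunk c g 0 (by omega)

theorem pvBlocks_eq_pvWsum (vals : List Int) (g : Nat) :
    pvBlocks vals (g : Int) = pvWsum vals (9 * g) := by
  induction hlen : vals.length using Nat.strong_induction_on generalizing vals g with
  | _ n ih =>
    match vals with
    | [] => rw [pvBlocks.eq_def]; simp [pvWsum]
    | v :: vs =>
      have hn : vs.length + 1 = n := by simpa using hlen
      rw [pvBlocks.eq_def]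
      simp only []
      rw [show pvWsum (v :: vs) (9 * g)
            = pvWsum ((v :: vs).take 9 ++ (v :: vs).drop 9) (9 * g) from by simp,
          pvWsum_append, pvWsum_chunk0 _ g (by simp)]
      congr 1
      by_cases hd : (v :: vs).drop 9 = []
      · rw [hd, pvBlocks.eq_def]; simp [pvWsum]
      · have hlen9 : 9 < vs.length + 1 := by
          by_contra hcon
          exact hd (List.drop_eq_nil_of_le (by simp only [List.length_cons]; omega))
        have htake : 9 * g + ((v :: vs).take 9).length = 9 * (g + 1) := by
          simp only [List.length_take, List.length_cons]
          omega
        have hrec := ih ((v :: vs).drop 9).length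
          (by simp only [List.length_drop, List.length_cons]; omega)
          ((v :: vs).drop 9) (g + 1) rfl
        rw [htake, show ((g : Int) + 1) = (((g + 1 : Nat)) : Int) from by push_cast; ring, hrec]

-- A's indexed loop over li computes pvWsum of the second components
theorem pvLoopA (r full : List (Char × Int)) (j : Nat) (h : full.drop j = r) (acc : Int) :
    (PySem.List.pyRange (j : Int) (full.length : Int) 1).foldl
      (fun ans i => ans + (PySem.List.pyGetD full i ('a', 0)).2 * (PySem.Int.floordiv i 9 + 1)) acc
    = acc + pvWsum (r.map (·.2)) j := by
  induction r generalizing j acc with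
  | nil =>
    have hj : full.length ≤ j := by
      by_contra hc
      have := List.drop_eq_nil_iff.mp h
      omega
    rw [PySem.List.pyRange_one_eq_nil (by exact_mod_cast hj)]
    simp [pvWsum]
  | cons p r ih =>
    have hj : j < full.length := by
      by_contra hc
      rw [List.drop_eq_nil_of_le (by omega)] at h
      simp at h
    have hget : full[j]? = some p := by
      have h0 : (full.drop j)[0]? = some p := by rw [h]; rfl
      rw [List.getElem?_drop] at h0
      simpa using h0
    have hdrop : full.drop (j + 1) = r := by
      have := congrArg List.tail h
      simpa [List.tail_drop] using this
    rw [PySem.List.pyRange_one_cons (by exact_mod_cast hj)]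
    rw [List.foldl_cons]
    rw [show ((j : Int) + 1) = (((j + 1 : Nat)) : Int) from by push_cast; ring]
    rw [ih (j + 1) hdrop]
    have hfd : PySem.Int.floordiv (j : Int) 9 = ((j / 9 : Nat) : Int) := by
      exact_mod_cast PySem.Int.floordiv_natCast j 9
    simp [pvWsum, PySem.List.pyGetD_natCast, hget]
    ring

-- map snd commutes with the stable sort keyed on snd (both sides are the same descending multiset)
theorem pvMapSndSorted (xs : List (Char × Int)) :
    (PySem.List.sorted xs (fun p => p.2) true).map (·.2)
    = PySem.List.sorted (xs.map (·.2)) (fun v => v) true := by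
  have hperm : ((PySem.List.sorted xs (fun p => p.2) true).map (·.2)).Perm
      (PySem.List.sorted (xs.map (·.2)) (fun v => v) true) :=
    ((PySem.List.sorted_perm xs (fun p => p.2) true).map _).trans
      (PySem.List.sorted_perm (xs.map (·.2)) (fun v => v) true).symm
  have h1 : ((PySem.List.sorted xs (fun p => p.2) true).map (·.2)).Pairwise
      (fun a b : Int => b ≤ a) :=
    List.Pairwise.map _ (fun a b hab => hab)
      (PySem.List.sorted_pairwise_rev xs (fun p => p.2))
  have h2 : (PySem.List.sorted (xs.map (·.2)) (fun v => v) true).Pairwise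
      (fun a b : Int => b ≤ a) :=
    PySem.List.sorted_pairwise_rev (xs.map (·.2)) (fun v => v)
  exact List.Perm.eq_of_pairwise (fun a b _ _ hab hba => le_antisymm hba hab) h1 h2 hperm

theorem pvLoopA0 (full : List (Char × Int)) :
    (PySem.List.pyRange 0 (full.length : Int) 1).foldl
      (fun ans i => ans + (PySem.List.pyGetD full i ('a', 0)).2 * (PySem.Int.floordiv i 9 + 1)) 0
    = pvWsum (full.map (·.2)) 0 := by
  have := pvLoopA full full 0 (by simp) 0
  simpa using this

theorem pvBlocks_eq_pvWsum0 (vals : List Int) : pvBlocks vals 0 = pvWsum vals 0 := by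
  simpa using pvBlocks_eq_pvWsum vals 0

-- ===== VERDICT (by name: the statement is the Claim_ definition above) =====
theorem minimumKeypadClickCount_spec : Claim_equal_minimumKeypadClickCount := by
  intro S _
  unfold Spec_minimumKeypadClickCount
  simp only [minimumKeypadClickCount, minimumKeypadClickCount_alt]
  set d := S.toList.foldl (fun d ele => d.insert ele (d.getD ele (0 : Int) + 1)) PySem.Dict.empty with hd
  have hcounter : d = PySem.Dict.counter S.toList := by
    rw [hd, PySem.Dict.foldl_insert_getD_add_one_eq_counter]
  have hnodup : (d.items.map (·.1)).Nodup := by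
    have : d.keys.Nodup := by rw [hcounter]; exact PySem.Dict.nodup_keys_counter S.toList
    simpa [PySem.Dict.keys] using this
  have hsortnodup : ((PySem.List.sorted d.items (fun x => x.2) true).map (·.1)).Nodup :=
    ((PySem.List.sorted_perm d.items (fun x => x.2) true).map _).nodup_iff.mpr hnodup
  have hitems : ((PySem.List.sorted d.items (fun x => x.2) true).foldl
      (fun d p => d.insert p.1 p.2) PySem.Dict.empty).items
      = PySem.List.sorted d.items (fun x => x.2) true := by
    have := PySem.Dict.items_foldl_insert_fresh (PySem.List.sorted d.items (fun x => x.2) true)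
      (k := fun p => p.1) (v := fun p => p.2) (d := PySem.Dict.empty)
      (by intro a _; exact PySem.Dict.contains_empty a.1) hsortnodup
    simpa using this
  rw [hitems, pvLoopA0, pvMapSndSorted,
    show PySem.Dict.values d = d.items.map (·.2) from rfl, pvBlocks_eq_pvWsum0]
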